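-- pv_equiv track=rewrite | github.com/stonexvii/advent_of_code | 2015/day_25/part_01.py | solution
-- ===== SOURCE A (Python) =====
-- def solution(line, position):
--     counter = 20151125
--     matrix = []
--     row = 0
--     line -= 1
--     position -= 1
--     while True:
--         for k in range(row, -1, -1):
--             if len(matrix) <= row:
--                 matrix.append([counter])
--             else:
--                 matrix[k].append(counter)
--             counter *= 252533
--             counter %= 33554393
--             if len(matrix) > line and len(matrix[line]) > position:
--                 return matrix[line][position]
--         row += 1
-- ===== SOURCE B (Python) =====
-- def solution(line, position):
--     if line < 1 or position < 1:
--         raise ValueError("coordinates are 1-based")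
--     l = line - 1
--     p = position - 1
--     d = l + p
--     n = d * (d + 1) // 2 + p
--     return 20151125 * pow(252533, n, 33554393) % 33554393
-- ===== Notes on version B (the rewrite author's own statement) =====
-- stated objective: faster
-- what changed: Replaces A's step-by-step diagonal filling of an ever-growing matrix by the closed-form step index n = (l+p)(l+p+1)/2 + p and binary modular exponentiation, no matrix at all.
-- outside the precondition, e.g. on solution(2, 0): A returns 31916031, B raises ValueError; on solution(0, 2): A does not finish within the time limit, B raises ValueError
import Mathlib
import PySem

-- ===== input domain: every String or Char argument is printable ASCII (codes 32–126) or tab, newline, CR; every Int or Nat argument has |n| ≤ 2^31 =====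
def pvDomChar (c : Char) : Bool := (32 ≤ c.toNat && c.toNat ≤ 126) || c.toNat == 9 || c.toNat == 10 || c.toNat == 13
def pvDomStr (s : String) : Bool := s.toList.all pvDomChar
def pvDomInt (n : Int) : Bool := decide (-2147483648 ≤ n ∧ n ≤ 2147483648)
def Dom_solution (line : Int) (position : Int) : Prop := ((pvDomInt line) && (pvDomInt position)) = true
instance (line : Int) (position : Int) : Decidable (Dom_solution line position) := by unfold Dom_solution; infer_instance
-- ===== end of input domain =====

-- B replaces A's cell-by-cell diagonal filling of a growing matrix by the closed-form
-- step index n = (l+p)(l+p+1)/2 + p and modular exponentiation (objective: faster).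

-- ===== PORT A =====
-- one pass of the inner `for k in range(row, -1, -1)` body, then recursion on the next k;
-- Sum.inl = the `return matrix[line][position]`, Sum.inr = the inner loop finished normally
def innerLoop (line position : Int) (row : Nat) (k : Nat)
    (matrix : List (List Int)) (counter : Int) : Sum Int (List (List Int) × Int) :=
  let matrix' := if matrix.length ≤ row then matrix ++ [[counter]]
                 else matrix.modify k (fun r => r ++ [counter])
  let counter' := PySem.Int.mod (counter * 252533) 33554393
  let rowl := PySem.List.pyGetD matrix' line []   -- matrix[line] (total rendering; inside Pre_ the index is in range when read)
  if ((matrix'.length : Int) > line ∧ (rowl.length : Int) > position) then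
    Sum.inl (PySem.List.pyGetD rowl position 0)   -- matrix[line][position]
  else
    match k with
    | 0 => Sum.inr (matrix', counter')
    | k' + 1 => innerLoop line position row k' matrix' counter'

-- the `while True` loop; fuel makes it total (Pre_ guarantees return before exhaustion)
def outerLoop (line position : Int) (matrix : List (List Int)) (counter : Int) (row : Nat) : Nat → Int
  | 0 => 0
  | fuel + 1 =>
    match innerLoop line position row row matrix counter with
    | Sum.inl v => v
    | Sum.inr (m', c') => outerLoop line position m' c' (row + 1) fuel

def solution (line : Int) (position : Int) : Int :=
  outerLoop (line - 1) (position - 1) [] 20151125 0 ((line + position).toNat + 1)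

-- ===== PORT B =====
-- B raises ValueError on non-1-based coordinates; those inputs are outside Pre_,
-- so the port returns 0 there (never claimed).
def solution_alt (line : Int) (position : Int) : Int :=
  if line < 1 ∨ position < 1 then 0
  else
    let l := line - 1
    let p := position - 1
    let d := l + p
    let n := PySem.Int.floordiv (d * (d + 1)) 2 + p
    PySem.Int.mod (20151125 * PySem.Int.powMod 252533 n.toNat 33554393) 33554393

-- ===== PRECONDITION & SPEC =====
-- Pre_ restricts to the natural 1-based grid coordinates: on non-positive line/position A
-- raises IndexError, loops forever, or returns accidental negative-wraparound values,
-- and B raises ValueError there.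
def Pre_solution (line : Int) (position : Int) : Prop := 1 ≤ line ∧ 1 ≤ position
instance (line : Int) (position : Int) : Decidable (Pre_solution line position) := by
  unfold Pre_solution; infer_instance

def pvWitness_solution : Int × Int := (3, 4)

def Spec_solution (line : Int) (position : Int) (out : Int) : Prop := out = solution_alt line position
instance (line : Int) (position : Int) (out : Int) : Decidable (Spec_solution line position out) := by
  unfold Spec_solution; infer_instance

-- ===== CLAIM (what is proved, stated in full; the proofs are below) =====
def Claim_equal_solution : Prop := ∀ (line : Int) (position : Int), Dom_solution line position → Pre_solution line position → Spec_solution line position (solution line position)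

-- ===== LEMMAS AND PROOFS =====

-- the n-th generated code value
def val (n : Nat) : Int := 20151125 * 252533 ^ n % 33554393

-- triangular numbers, recursively
def tri : Nat → Nat
  | 0 => 0
  | n + 1 => tri n + (n + 1)

lemma tri_closed (n : Nat) : tri n = n * (n + 1) / 2 := by
  have h : 2 * tri n = n * (n + 1) := by
    induction n with
    | zero => rfl
    | succ m ih => simp only [tri]; ring_nf; ring_nf at ih; omega
  omega

lemma val_succ (n : Nat) : PySem.Int.mod (val n * 252533) 33554393 = val (n + 1) := by
  rw [PySem.Int.mod_eq_emod_of_pos (by norm_num)]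
  simp only [val, pow_succ]
  conv_rhs => rw [← mul_assoc, Int.mul_emod]
  norm_num

-- the row that A's matrix ends up holding at index k, with `len` cells filled
def idealRow (k len : Nat) : List Int := (List.range len).map (fun j => val (tri (k + j) + j))

-- A's matrix after r complete diagonals
def idealMat (r : Nat) : List (List Int) := (List.range r).map (fun k => idealRow k (r - k))

-- A's matrix during diagonal r, after the inner step for index k has run
def midMat (r k : Nat) : List (List Int) :=
  (List.range (r + 1)).map (fun i => idealRow i (r - i + (if k ≤ i then 1 else 0)))

lemma idealRow_succ (k n : Nat) :
    idealRow k (n + 1) = idealRow k n ++ [val (tri (k + n) + n)] := by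
  simp [idealRow, List.range_succ]

lemma length_idealRow (k n : Nat) : (idealRow k n).length = n := by simp [idealRow]

lemma length_idealMat (r : Nat) : (idealMat r).length = r := by simp [idealMat]

lemma length_midMat (r k : Nat) : (midMat r k).length = r + 1 := by simp [midMat]

-- step L1: appending the first cell of diagonal r
lemma append_first (r : Nat) : idealMat r ++ [[val (tri r)]] = midMat r r := by
  apply List.ext_getElem
  · simp [idealMat, midMat]
  intro i h1 h2
  have hlen : (idealMat r).length = r := length_idealMat r
  rcases Nat.lt_or_ge i r with hi | hi
  · rw [List.getElem_append_left (by omega)]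
    simp only [idealMat, midMat, List.getElem_map, List.getElem_range]
    have : ¬ r ≤ i := by omega
    simp [this]
  · have hir : i = r := by
      have := h2; rw [length_midMat] at this; omega
    subst hir
    rw [List.getElem_append_right (by omega)]
    simp only [midMat, List.getElem_map, List.getElem_range, hlen]
    have h0 : i - i + (if i ≤ i then 1 else 0) = 1 := by simp
    rw [h0]
    simp [idealRow, List.range_succ]

-- step L2: the modify step for k < r
lemma modify_step (r k : Nat) (hk : k < r) :
    (midMat r (k + 1)).modify k (fun row => row ++ [val (tri r + (r - k))]) = midMat r k := by
  apply List.ext_getElem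
  · simp [midMat]
  intro i h1 h2
  rw [List.getElem_modify]
  simp only [midMat, List.getElem_map, List.getElem_range]
  rcases eq_or_ne k i with hki | hki
  · subst hki
    have ha : ¬ (k + 1 ≤ k) := by omega
    have hb : k ≤ k := le_refl k
    simp only [ha, if_false, hb, if_true, Nat.add_zero]
    rw [idealRow_succ]
    have : k + (r - k) = r := by omega
    rw [this]
  · have : (k + 1 ≤ i) = (k ≤ i) := by
      apply propext; constructor <;> intro h <;> omega
    simp [hki, this]

-- step L3: after k = 0 the diagonal is complete
lemma midMat_zero (r : Nat) : midMat r 0 = idealMat (r + 1) := by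
  apply List.ext_getElem
  · simp [idealMat, midMat]
  intro i h1 h2
  simp only [midMat, idealMat, List.getElem_map, List.getElem_range]
  have hi : i < r + 1 := by simpa [midMat] using h1
  have : r - i + (if 0 ≤ i then 1 else 0) = r + 1 - i := by simp; omega
  rw [this]

lemma getD_midMat (r k l : Nat) (hl : l ≤ r) :
    (midMat r k).getD l [] = idealRow l (r - l + (if k ≤ l then 1 else 0)) := by
  rw [List.getD_eq_getElem _ _ (by rw [length_midMat]; omega)]
  simp [midMat]

-- the body's matrix update: append a new row when k = r, else append to row k
lemma step_matrix (r j : Nat) (hj : j ≤ r) :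
    (if (if j = r then idealMat r else midMat r (j + 1)).length ≤ r
     then (if j = r then idealMat r else midMat r (j + 1)) ++ [[val (tri r + (r - j))]]
     else (if j = r then idealMat r else midMat r (j + 1)).modify j
            (fun row => row ++ [val (tri r + (r - j))])) = midMat r j := by
  rcases eq_or_ne j r with rfl | hne
  · rw [if_pos rfl]
    rw [if_pos (by simp [length_idealMat])]
    simpa using append_first j
  · have hjr : j < r := by omega
    rw [if_neg hne]
    rw [if_neg (by rw [length_midMat]; omega)]
    exact modify_step r j hjr

lemma getD_len (r k l : Nat) :
    ((midMat r k).getD l []).length = if l ≤ r then r - l + (if k ≤ l then 1 else 0) else 0 := by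
  rcases Nat.lt_or_ge r l with h | h
  · rw [List.getD_eq_default _ _ (by rw [length_midMat]; omega), if_neg (by omega)]
    rfl
  · rw [getD_midMat r k l h, length_idealRow, if_pos h]

-- the return check `len(matrix) > line and len(matrix[line]) > position`
lemma cond_iff (l p r j : Nat) (hr : r ≤ l + p) :
    ((((midMat r j).length : Int) > (l : Int) ∧
      ((PySem.List.pyGetD (midMat r j) (l : Int) []).length : Int) > (p : Int)) ↔
     (r = l + p ∧ j ≤ l)) := by
  rw [PySem.List.pyGetD_natCast, length_midMat, getD_len]
  split_ifs with h1 h2 <;> omega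

-- the returned cell `matrix[line][position]`
lemma retval (l p r j : Nat) (hrl : r = l + p) (hjl : j ≤ l) :
    PySem.List.pyGetD (PySem.List.pyGetD (midMat r j) (l : Int) []) (p : Int) 0 =
      val (tri r + p) := by
  subst hrl
  rw [PySem.List.pyGetD_natCast (midMat (l + p) j) l []]
  rw [getD_midMat (l + p) j l (by omega), PySem.List.pyGetD_natCast]
  have h1 : l + p - l + (if j ≤ l then 1 else 0) = p + 1 := by rw [if_pos hjl]; omega
  rw [h1, List.getD_eq_getElem _ _ (by rw [length_idealRow]; omega)]
  simp [idealRow]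

-- the inner loop invariant
lemma innerLoop_eq (l p r k : Nat) (hr : r ≤ l + p) (hk : k ≤ r) :
    innerLoop (l : Int) (p : Int) r k
      (if k = r then idealMat r else midMat r (k + 1))
      (val (tri r + (r - k))) =
    (if r = l + p then Sum.inl (val (tri r + p))
     else Sum.inr (idealMat (r + 1), val (tri (r + 1)))) := by
  induction k with
  | zero =>
    simp only [innerLoop]
    rw [step_matrix r 0 (by omega)]
    simp only [cond_iff l p r 0 hr, Nat.zero_le, and_true]
    split_ifs with h
    · rw [retval l p r 0 h (Nat.zero_le l)]
    · rw [midMat_zero, val_succ]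
      have hz : tri r + (r - 0) + 1 = tri (r + 1) := by simp [tri]; omega
      rw [hz]
  | succ k ih =>
    simp only [innerLoop]
    rw [step_matrix r (k + 1) hk]
    simp only [cond_iff l p r (k + 1) hr]
    have hc : tri r + (r - (k + 1)) + 1 = tri r + (r - k) := by omega
    have ihk := ih (by omega)
    rw [if_neg (by omega : ¬ k = r)] at ihk
    rcases eq_or_ne r (l + p) with hrp | hrp
    · rw [if_pos hrp]
      by_cases hkl : k + 1 ≤ l
      · rw [if_pos ⟨hrp, hkl⟩, retval l p r (k + 1) hrp hkl]
      · rw [if_neg (by tauto), val_succ, hc, ihk, if_pos hrp]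
    · rw [if_neg hrp, if_neg (by tauto), val_succ, hc, ihk, if_neg hrp]

-- the outer loop
lemma outerLoop_eq (l p r fuel : Nat) (hr : r ≤ l + p) (hfuel : l + p + 1 ≤ r + fuel) :
    outerLoop (l : Int) (p : Int) (idealMat r) (val (tri r)) r fuel = val (tri (l + p) + p) := by
  induction fuel generalizing r with
  | zero => omega
  | succ fuel ih =>
    simp only [outerLoop]
    have hinner := innerLoop_eq l p r r hr (le_refl r)
    rw [if_pos rfl, Nat.sub_self, Nat.add_zero] at hinner
    rw [hinner]
    rcases eq_or_ne r (l + p) with hrp | hrp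
    · rw [if_pos hrp, hrp]
    · rw [if_neg hrp]
      exact ih (r + 1) (by omega) (by omega)

lemma solution_eq_val (l p : Nat) :
    solution ((l : Int) + 1) ((p : Int) + 1) = val (tri (l + p) + p) := by
  have e1 : ((l : Int) + 1 - 1) = (l : Int) := by ring
  have e2 : ((p : Int) + 1 - 1) = (p : Int) := by ring
  have e3 : ((l : Int) + 1 + ((p : Int) + 1)).toNat = l + p + 2 := by omega
  have h0 : ([] : List (List Int)) = idealMat 0 := rfl
  have h1 : (20151125 : Int) = val (tri 0) := by norm_num [val, tri]
  simp only [solution, e1, e2, e3]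
  rw [h0, h1]
  exact outerLoop_eq l p 0 (l + p + 3) (by omega) (by omega)

lemma solution_alt_eq_val (l p : Nat) :
    solution_alt ((l : Int) + 1) ((p : Int) + 1) = val (tri (l + p) + p) := by
  have e1 : ((l : Int) + 1 - 1) = (l : Int) := by ring
  have e2 : ((p : Int) + 1 - 1) = (p : Int) := by ring
  have hg : ¬ ((l : Int) + 1 < 1 ∨ (p : Int) + 1 < 1) := by push_neg; omega
  simp only [solution_alt, if_neg hg, e1, e2]
  have hn : PySem.Int.floordiv (((l : Int) + (p : Int)) * (((l : Int) + (p : Int)) + 1)) 2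
      + (p : Int) = ((tri (l + p) + p : Nat) : Int) := by
    rw [show ((l : Int) + (p : Int)) * (((l : Int) + (p : Int)) + 1)
          = (((l + p) * (l + p + 1) : Nat) : Int) from by push_cast; ring]
    rw [show PySem.Int.floordiv (((l + p) * (l + p + 1) : Nat) : Int) 2
          = (((l + p) * (l + p + 1) / 2 : Nat) : Int) from by
        exact_mod_cast PySem.Int.floordiv_natCast ((l + p) * (l + p + 1)) 2]
    rw [tri_closed]
    push_cast
    ring
  rw [hn, Int.toNat_natCast]
  rw [PySem.Int.powMod_eq_emod _ _ (by norm_num)]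
  rw [PySem.Int.mod_eq_emod_of_pos (by norm_num)]
  simp only [val]
  conv_lhs => rw [Int.mul_emod]
  conv_rhs => rw [Int.mul_emod]
  rw [Int.emod_emod_of_dvd _ dvd_rfl]

-- ===== VERDICT (by name: the statement is the Claim_ definition above) =====
theorem solution_spec : Claim_equal_solution := by
  intro line position _ hpre
  obtain ⟨h1, h2⟩ := hpre
  unfold Spec_solution
  obtain ⟨l, hl⟩ : ∃ l : Nat, line = (l : Int) + 1 :=
    ⟨(line - 1).toNat, by omega⟩
  obtain ⟨p, hp⟩ : ∃ p : Nat, position = (p : Int) + 1 :=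
    ⟨(position - 1).toNat, by omega⟩
  subst hl hp
  rw [solution_eq_val, solution_alt_eq_val]
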